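-- pv_equiv track=rewrite | github.com/anasmajid/CZ4031_Project2 | planProcess.py | processPlanStep
-- ===== SOURCE A (Python) =====
-- def processPlanStep(plan):
--     steps = []
--     step_string = ""
--     for line in plan:
--         temp_string = line.replace(" ","")
--
--         # New step
--         if line.find("->") != -1:
--             steps.append(step_string)
--             step_string = temp_string
--
--         # Same step
--         else:
--             step_string += temp_string
--     # Final append
--     steps.append(step_string)
--
--     # Ignore Cost
--     return steps[1:]
-- ===== SOURCE B (Python) =====
-- def processPlanStep(plan):
--     lines = list(plan)
--     idxs = [i for i, line in enumerate(lines) if "->" in line]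
--     ends = idxs[1:] + [len(lines)]
--     return ["".join(l.replace(" ", "") for l in lines[a:b])
--             for a, b in zip(idxs, ends)]
-- ===== Notes on version B (the rewrite author's own statement) =====
-- stated objective: alternative
-- what changed: Replaces A's single pass with a running string accumulator and flush-on-arrow (plus a final [1:] to drop the pre-first-arrow content) by an index-table pass: collect the arrow-line positions, then build each step by slicing between consecutive positions and joining the space-stripped lines, which omits the pre-arrow prefix naturally.
import Mathlib
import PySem

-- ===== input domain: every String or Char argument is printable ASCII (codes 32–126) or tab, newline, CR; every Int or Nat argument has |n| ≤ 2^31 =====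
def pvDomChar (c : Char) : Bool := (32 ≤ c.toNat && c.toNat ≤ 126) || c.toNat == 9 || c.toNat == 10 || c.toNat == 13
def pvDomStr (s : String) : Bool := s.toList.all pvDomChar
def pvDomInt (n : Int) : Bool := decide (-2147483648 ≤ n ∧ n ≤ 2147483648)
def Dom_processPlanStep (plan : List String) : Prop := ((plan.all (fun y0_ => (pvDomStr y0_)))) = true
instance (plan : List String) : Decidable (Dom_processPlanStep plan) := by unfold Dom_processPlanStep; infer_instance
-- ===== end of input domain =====

-- B replaces A's flush-on-arrow accumulator pass (with a final [1:]) by an arrow-index table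
-- plus slicing between consecutive arrow positions; same cost, different decomposition.


-- ===== PORT A =====
def processPlanStep (plan : List String) : List String :=
  let r := plan.foldl (fun (st : List String × String) line =>
      let temp_string := PySem.Str.replace line " " ""
      if PySem.Str.find line "->" ≠ -1 then
        (st.1 ++ [st.2], temp_string)
      else
        (st.1, st.2 ++ temp_string)) ([], "")
  PySem.List.slice (r.1 ++ [r.2]) (some 1) none

-- ===== PORT B =====
def processPlanStep_alt (plan : List String) : List String :=
  let lines := plan
  let idxs := ((PySem.List.enumerate lines 0).filter (fun p => PySem.Str.isIn "->" p.2)).map (·.1)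
  let ends := PySem.List.slice idxs (some 1) none ++ [(lines.length : Int)]
  (idxs.zip ends).map (fun p =>
    PySem.Str.join "" ((PySem.List.slice lines (some p.1) (some p.2)).map
      (fun l => PySem.Str.replace l " " "")))

-- ===== PRECONDITION & SPEC =====
def Spec_processPlanStep (plan : List String) (out : List String) : Prop := out = processPlanStep_alt plan
instance (plan : List String) (out : List String) : Decidable (Spec_processPlanStep plan out) := by unfold Spec_processPlanStep; infer_instance

-- ===== CLAIM (what is proved, stated in full; the proofs are below) =====
def Claim_equal_processPlanStep : Prop := ∀ (plan : List String), Dom_processPlanStep plan → Spec_processPlanStep plan (processPlanStep plan)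

-- ===== LEMMAS AND PROOFS =====

/-- The arrow test shared by both programs. -/
def pvArrow (l : String) : Bool := PySem.Str.isIn "->" l

/-- `line.replace(" ", "")`. -/
def pvRepl (l : String) : String := PySem.Str.replace l " " ""

/-- A's loop from an arrow onwards: current chunk `cur`, flush on each arrow line. -/
def pvGo (cur : String) : List String → List String
  | [] => [cur]
  | l :: rest => if pvArrow l then cur :: pvGo (pvRepl l) rest else pvGo (cur ++ pvRepl l) rest

/-- Indices (Nat) of the arrow lines. -/
def pvIdxs : List String → List Nat
  | [] => []
  | l :: rest => if pvArrow l then 0 :: (pvIdxs rest).map (· + 1) else (pvIdxs rest).map (· + 1)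

/-- Concatenation of the space-stripped lines before the first arrow line. -/
def pvPre : List String → String
  | [] => ""
  | l :: rest => if pvArrow l then "" else pvRepl l ++ pvPre rest

/-- B's slicing pass, on Nat indices. -/
def pvSegs (lines : List String) (idxs : List Nat) : List String :=
  (idxs.zip (idxs.tail ++ [lines.length])).map (fun p =>
    PySem.Str.join "" (((lines.drop p.1).take (p.2 - p.1)).map pvRepl))


theorem pv_arrow_true {l : String} (h : ("->" : String).toList <:+: l.toList) :
    (PySem.Str.find l "->" ≠ -1) ∧ pvArrow l = true := by
  exact ⟨(PySem.Str.find_ne_neg_one_iff l "->").mpr h,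
         (PySem.Str.isIn_iff_infix "->" l).mpr h⟩

theorem pv_arrow_false {l : String} (h : ¬ ("->" : String).toList <:+: l.toList) :
    ¬ (PySem.Str.find l "->" ≠ -1) ∧ pvArrow l = false := by
  constructor
  · simp only [ne_eq, not_not]
    by_contra hne
    exact h ((PySem.Str.find_ne_neg_one_iff l "->").mp hne)
  · by_contra hb
    exact h ((PySem.Str.isIn_iff_infix "->" l).mp (by simpa using hb))

/-- A's fold, characterised: flushed steps followed by the pending chunk is `steps ++ pvGo cur plan`. -/
theorem pv_foldA (plan : List String) : ∀ (steps : List String) (cur : String),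
    (plan.foldl (fun (st : List String × String) line =>
        let temp_string := PySem.Str.replace line " " ""
        if PySem.Str.find line "->" ≠ -1 then
          (st.1 ++ [st.2], temp_string)
        else
          (st.1, st.2 ++ temp_string)) (steps, cur)).1
      ++ [(plan.foldl (fun (st : List String × String) line =>
        let temp_string := PySem.Str.replace line " " ""
        if PySem.Str.find line "->" ≠ -1 then
          (st.1 ++ [st.2], temp_string)
        else
          (st.1, st.2 ++ temp_string)) (steps, cur)).2]
      = steps ++ pvGo cur plan := by
  induction plan with
  | nil => intro steps cur; simp [pvGo]
  | cons l rest ih =>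
    intro steps cur
    by_cases h : ("->" : String).toList <:+: l.toList
    · obtain ⟨h1, h2⟩ := pv_arrow_true h
      simp only [List.foldl_cons, if_pos h1, pvGo, h2, if_pos]
      rw [ih]; simp [pvRepl]
    · obtain ⟨h1, h2⟩ := pv_arrow_false h
      simp only [List.foldl_cons, if_neg h1, pvGo, h2]
      rw [ih]; simp [pvRepl]

theorem pv_join_nil : PySem.Str.join "" ([] : List String) = "" := by
  apply String.toList_inj.mp
  simp [PySem.Str.toList_join, PySem.Chars.join_nil]

theorem pv_join_cons (a : String) (rest : List String) :
    PySem.Str.join "" (a :: rest) = a ++ PySem.Str.join "" rest := by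
  apply String.toList_inj.mp
  cases rest with
  | nil => simp [PySem.Str.toList_join, PySem.Chars.join_singleton, PySem.Chars.join_nil]
  | cons b t =>
    simp [PySem.Str.toList_join, PySem.Chars.join_cons_cons]

/-- Prefixing one line shifts every index by one and leaves the segments unchanged. -/
theorem pv_segs_shift (l : String) (lines : List String) (idxs : List Nat) :
    pvSegs (l :: lines) (idxs.map (· + 1)) = pvSegs lines idxs := by
  unfold pvSegs
  have hT : (idxs.map (· + 1)).tail ++ [(l :: lines).length]
      = (idxs.tail ++ [lines.length]).map (· + 1) := by
    simp [List.map_tail]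
  rw [hT, List.zip_map]
  rw [List.map_map]
  apply List.map_congr_left
  intro p _
  simp [Prod.map, Nat.succ_sub_succ]

/-- The lines before the first arrow, joined, are `pvPre`. -/
theorem pv_pre_char (lines : List String) :
    PySem.Str.join "" ((lines.take ((pvIdxs lines).headD lines.length)).map pvRepl)
      = pvPre lines := by
  induction lines with
  | nil => simp [pvIdxs, pvPre, pv_join_nil]
  | cons l rest ih =>
    by_cases h : pvArrow l = true
    · simp [pvIdxs, pvPre, h, pv_join_nil]
    · simp only [pvIdxs, pvPre, h, if_neg, Bool.false_eq_true, not_false_iff]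
      have hd : ((pvIdxs rest).map (· + 1)).headD (l :: rest).length
          = (pvIdxs rest).headD rest.length + 1 := by
        cases pvIdxs rest <;> simp
      rw [hd, List.take_succ_cons, List.map_cons, pv_join_cons, ih]

/-- Putting an arrow line in front: one new segment from it to the old first arrow. -/
theorem pv_segs_cons_arrow (l : String) (rest : List String) :
    pvSegs (l :: rest) (0 :: (pvIdxs rest).map (· + 1))
      = (pvRepl l ++ pvPre rest) :: pvSegs rest (pvIdxs rest) := by
  have hpre := pv_pre_char rest
  cases hm : pvIdxs rest with
  | nil =>
    rw [hm] at hpre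
    simp only [List.headD_nil] at hpre
    unfold pvSegs
    simp only [List.map_nil, List.nil_append, List.tail_cons, List.zip_cons_cons,
      List.zip_nil_left, List.zip_nil_right, List.map_cons, List.map_nil]
    rw [List.drop_zero, Nat.sub_zero, List.length_cons,
      List.take_of_length_le (by simp), List.map_cons, pv_join_cons]
    rw [List.take_length] at hpre
    rw [hpre]
  | cons a t =>
    rw [hm] at hpre
    simp only [List.headD_cons] at hpre
    have hshift := pv_segs_shift l rest (a :: t)
    unfold pvSegs
    unfold pvSegs at hshift
    simp only [List.map_cons, List.tail_cons, List.length_cons, List.cons_append,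
      List.zip_cons_cons, List.drop_zero, Nat.sub_zero, List.take_succ_cons,
      pv_join_cons] at hshift ⊢
    rw [hpre, hshift]

/-- A's tail-run equals the head chunk followed by B's segments. -/
theorem pv_go_segs (lines : List String) : ∀ (cur : String),
    pvGo cur lines = (cur ++ pvPre lines) :: pvSegs lines (pvIdxs lines) := by
  induction lines with
  | nil =>
    intro cur
    simp [pvGo, pvPre, pvSegs, pvIdxs]
  | cons l rest ih =>
    intro cur
    by_cases h : pvArrow l = true
    · simp only [pvGo, pvPre, pvIdxs, h, if_pos]
      rw [ih (pvRepl l), pv_segs_cons_arrow]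
      simp
    · simp only [pvGo, pvPre, pvIdxs, h, Bool.false_eq_true, if_neg, not_false_iff]
      rw [ih (cur ++ pvRepl l), pv_segs_shift]
      have : cur ++ pvRepl l ++ pvPre rest = cur ++ (pvRepl l ++ pvPre rest) := by
        apply String.toList_inj.mp; simp
      rw [this]

/-- B's index table, recursively. -/
theorem pv_enum_filter (xs : List String) : ∀ (s : Int),
    (((PySem.List.enumerate xs s).filter (fun p => PySem.Str.isIn "->" p.2)).map (·.1))
      = (pvIdxs xs).map (fun (n : Nat) => (n : Int) + s) := by
  induction xs with
  | nil => intro s; simp [PySem.List.enumerate_nil, pvIdxs]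
  | cons l rest ih =>
    intro s
    rw [PySem.List.enumerate_cons]
    by_cases h : pvArrow l = true
    · have hb : PySem.Str.isIn "->" l = true := h
      simp only [pvIdxs, h, if_pos, List.filter_cons, hb, List.map_cons]
      rw [ih (s + 1)]
      simp only [List.map_map]
      congr 1
      · omega
      · apply List.map_congr_left; intro n _; simp only [Function.comp_apply]
        omega
    · have hb : PySem.Str.isIn "->" l = false := by simpa using h
      simp only [pvIdxs, h, Bool.false_eq_true, if_neg, not_false_iff,
        List.filter_cons, hb]
      rw [ih (s + 1)]
      simp only [List.map_map]
      apply List.map_congr_left; intro n _; simp only [Function.comp_apply]; omega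

/-- `pv_enum_filter` at start 0. -/
theorem pv_enum_filter_zero (xs : List String) :
    (((PySem.List.enumerate xs 0).filter (fun p => PySem.Str.isIn "->" p.2)).map (·.1))
      = (pvIdxs xs).map (fun (n : Nat) => (n : Int)) := by
  rw [pv_enum_filter xs 0]
  apply List.map_congr_left; intro n _; omega

/-- B computes `pvSegs` on the Nat index table. -/
theorem pv_alt_eq_segs (plan : List String) :
    processPlanStep_alt plan = pvSegs plan (pvIdxs plan) := by
  unfold processPlanStep_alt
  dsimp only
  rw [pv_enum_filter_zero plan]
  rw [PySem.List.slice_from_one]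
  have hE : (List.map (fun (n : Nat) => (n : Int)) (pvIdxs plan)).tail ++ [(plan.length : Int)]
      = ((pvIdxs plan).tail ++ [plan.length]).map (fun (n : Nat) => (n : Int)) := by
    rw [← List.map_tail, List.map_append]
    rfl
  rw [hE, List.zip_map, List.map_map]
  unfold pvSegs
  apply List.map_congr_left
  intro p _
  simp only [Function.comp_apply, Prod.map_fst, Prod.map_snd]
  rw [PySem.List.slice_natCast]
  rfl

-- ===== VERDICT (by name: the statement is the Claim_ definition above) =====
theorem processPlanStep_spec : Claim_equal_processPlanStep := by
  intro plan _
  unfold Spec_processPlanStep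
  unfold processPlanStep
  dsimp only
  rw [pv_alt_eq_segs]
  rw [PySem.List.slice_from_one]
  rw [pv_foldA plan [] ""]
  rw [List.nil_append, pv_go_segs plan ""]
  simp
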